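-- pv_equiv track=rewrite | github.com/amanambak/dual-channel | backend/app/services/schema_extraction.py | _cleanup_location_phrase
-- ===== SOURCE A (Python) =====
-- def _cleanup_location_phrase(value: str) -> str:
--     tokens = value.split()
--     stop_words = {
--         "sir",
--         "mujhe",
--         "main",
--         "mai",
--         "mera",
--         "meri",
--         "mere",
--         "hum",
--         "hume",
--         "hame",
--         "ka",
--         "ki",
--         "ke",
--         "mein",
--         "me",
--         "loan",
--         "loans",
--         "chahiye",
--         "chahie",
--         "requirement",
--         "need",
--         "needed",
--         "property",
--         "ghar",
--         "flat",
--         "plot",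
--         "hai",
--         "hota",
--         "hoti",
--         "ho",
--     }
--     collected: list[str] = []
--     for token in reversed(tokens):
--         if token.lower() in stop_words:
--             if collected:
--                 break
--             continue
--         collected.append(token)
--     cleaned = list(reversed(collected))
--     if len(cleaned) > 3:
--         cleaned = cleaned[-3:]
--     return " ".join(cleaned)
-- ===== SOURCE B (Python) =====
-- _STOP_WORDS = {
--     "sir", "mujhe", "main", "mai", "mera", "meri", "mere", "hum", "hume",
--     "hame", "ka", "ki", "ke", "mein", "me", "loan", "loans", "chahiye",
--     "chahie", "requirement", "need", "needed", "property", "ghar", "flat",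
--     "plot", "hai", "hota", "hoti", "ho",
-- }
--
--
-- def _cleanup_location_phrase(value: str) -> str:
--     # Single forward pass: the answer is the LAST maximal run of consecutive
--     # non-stop-word tokens, truncated to its final 3 tokens.
--     best: list[str] = []
--     run: list[str] = []
--     for token in value.split():
--         if token.lower() in _STOP_WORDS:
--             if run:
--                 best = run
--                 run = []
--         else:
--             run.append(token)
--     if run:
--         best = run
--     return " ".join(best[-3:])
-- ===== Notes on version B (the rewrite author's own statement) =====
-- stated objective: alternative
-- what changed: Replaces A's reverse scan with break/continue by a single forward left-to-right pass that maintains the current run of consecutive non-stop-word tokens and remembers the last completed run; the answer is the last maximal non-stop run, unconditionally truncated to its final 3 tokens.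
import Mathlib
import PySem

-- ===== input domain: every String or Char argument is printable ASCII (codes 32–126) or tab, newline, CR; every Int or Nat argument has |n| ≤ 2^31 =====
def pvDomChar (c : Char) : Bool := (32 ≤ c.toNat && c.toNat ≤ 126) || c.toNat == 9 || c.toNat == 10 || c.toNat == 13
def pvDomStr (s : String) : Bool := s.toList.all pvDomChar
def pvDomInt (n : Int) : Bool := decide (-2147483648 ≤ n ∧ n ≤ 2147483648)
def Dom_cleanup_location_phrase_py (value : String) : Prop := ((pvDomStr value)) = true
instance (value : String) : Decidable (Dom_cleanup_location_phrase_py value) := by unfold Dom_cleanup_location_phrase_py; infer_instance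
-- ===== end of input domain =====

-- B replaces A's reverse loop (skip trailing stop words, collect until break) by one
-- forward pass keeping the last maximal run of non-stop tokens (objective: alternative; same cost).

-- the stop-word set shared by both versions (membership test only, so a list with
-- `contains` is exact)
def pvStopWords : List String :=
  ["sir", "mujhe", "main", "mai", "mera", "meri", "mere", "hum", "hume",
   "hame", "ka", "ki", "ke", "mein", "me", "loan", "loans", "chahiye",
   "chahie", "requirement", "need", "needed", "property", "ghar", "flat",
   "plot", "hai", "hota", "hoti", "ho"]

-- ===== PORT A =====
-- A's loop over reversed(tokens): `collected` accumulator, continue on a stop word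
-- while empty, break on a stop word once non-empty.
def pvALoop : List String → List String → List String
  | acc, [] => acc
  | acc, t :: ts =>
    if pvStopWords.contains (PySem.Str.lower t) then
      (if acc.isEmpty then pvALoop acc ts else acc)
    else pvALoop (acc ++ [t]) ts

def cleanup_location_phrase_py (value : String) : String :=
  let tokens := PySem.Str.split₀ value
  let collected := pvALoop [] tokens.reverse
  let cleaned := collected.reverse
  let cleaned := if cleaned.length > 3 then PySem.List.slice cleaned (some (-3)) none else cleaned
  PySem.Str.join " " cleaned

-- ===== PORT B =====
def pvIsStop (t : String) : Bool := pvStopWords.contains (PySem.Str.lower t)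

-- B's loop body: close the current run on a stop word (remembering it if non-empty),
-- otherwise extend the run.
def pvStep : List String × List String → String → List String × List String
  | (best, run), t =>
    if pvIsStop t then (if run.isEmpty then (best, run) else (run, []))
    else (best, run ++ [t])

def cleanup_location_phrase_py_alt (value : String) : String :=
  let st := (PySem.Str.split₀ value).foldl pvStep ([], [])
  let best := if st.2.isEmpty then st.1 else st.2
  PySem.Str.join " " (PySem.List.slice best (some (-3)) none)

-- ===== PRECONDITION & SPEC =====
def Spec_cleanup_location_phrase_py (value : String) (out : String) : Prop := out = cleanup_location_phrase_py_alt value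
instance (value : String) (out : String) : Decidable (Spec_cleanup_location_phrase_py value out) := by unfold Spec_cleanup_location_phrase_py; infer_instance

-- ===== CLAIM (what is proved, stated in full; the proofs are below) =====
def Claim_equal_cleanup_location_phrase_py : Prop := ∀ (value : String), Dom_cleanup_location_phrase_py value → Spec_cleanup_location_phrase_py value (cleanup_location_phrase_py value)

-- ===== LEMMAS AND PROOFS =====

-- unfolding equation for A's loop, phrased with B's predicate (definitional)
lemma pvALoop_cons (acc : List String) (t : String) (ts : List String) :
    pvALoop acc (t :: ts) =
      if pvIsStop t then (if acc.isEmpty then pvALoop acc ts else acc)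
      else pvALoop (acc ++ [t]) ts := rfl

-- once the accumulator is non-empty, A's loop only extends it with the leading
-- non-stop-word run (break at the first stop word)
lemma pvALoop_ne_nil (acc : List String) (h : acc ≠ []) (l : List String) :
    pvALoop acc l = acc ++ l.takeWhile (fun t => ! pvIsStop t) := by
  induction l generalizing acc with
  | nil => simp [pvALoop]
  | cons t ts ih =>
    cases hs : pvIsStop t with
    | true => simp [pvALoop_cons, hs, List.isEmpty_iff, h]
    | false =>
      have h' : acc ++ [t] ≠ [] := by simp
      simp [pvALoop_cons, hs, ih _ h']

-- with the empty accumulator, A's loop is the dropWhile/takeWhile composition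
lemma pvALoop_nil (l : List String) :
    pvALoop [] l = (l.dropWhile pvIsStop).takeWhile (fun t => ! pvIsStop t) := by
  induction l with
  | nil => simp [pvALoop]
  | cons t ts ih =>
    cases hs : pvIsStop t with
    | true => simp [pvALoop_cons, hs, ih]
    | false =>
      have h' : ([t] : List String) ≠ [] := by simp
      simp only [pvALoop_cons, hs, List.dropWhile_cons, if_neg Bool.false_ne_true]
      rw [List.takeWhile_cons_of_pos (by simp [hs]), List.nil_append, pvALoop_ne_nil [t] h' ts]
      rfl

-- invariant of B's forward fold: the run component is the trailing non-stop run of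
-- the processed prefix, and (run if non-empty else best) is the last maximal run
lemma pvStep_invariant (l : List String) :
    (l.foldl pvStep ([], [])).2 = ((l.reverse.takeWhile (fun t => ! pvIsStop t)).reverse : List String) ∧
    (if (l.foldl pvStep ([], [])).2.isEmpty then (l.foldl pvStep ([], [])).1 else (l.foldl pvStep ([], [])).2)
      = ((l.reverse.dropWhile pvIsStop).takeWhile (fun t => ! pvIsStop t)).reverse := by
  induction l using List.reverseRecOn with
  | nil => simp
  | append_singleton l t ih =>
    obtain ⟨h1, h2⟩ := ih
    rw [List.foldl_append, List.foldl_cons, List.foldl_nil]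
    cases hst : l.foldl pvStep ([], []) with
    | mk b r =>
      rw [hst] at h1 h2
      simp only at h1 h2
      cases hs : pvIsStop t with
      | true =>
        simp only [pvStep, hs, if_true, List.reverse_append, List.reverse_singleton,
          List.singleton_append, List.takeWhile_cons, List.dropWhile_cons, hs,
          Bool.not_true, if_neg Bool.false_ne_true]
        cases hr : r.isEmpty with
        | true =>
          have hr' : r = [] := List.isEmpty_iff.mp hr
          simp only [hr, if_true]
          refine ⟨hr', ?_⟩
          simpa [hr] using h2
        | false =>
          simp only [hr, Bool.false_eq_true, if_false]
          refine ⟨rfl, ?_⟩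
          simpa [hr] using h2
      | false =>
        simp only [pvStep, hs, if_neg Bool.false_ne_true, List.reverse_append,
          List.reverse_singleton, List.singleton_append, List.takeWhile_cons,
          List.dropWhile_cons, hs, Bool.not_false, if_true]
        constructor
        · simp [h1]
        · simp [h1]

-- Python best[-3:] is the identity when the list has at most 3 elements
lemma pvSliceNeg3_of_le (l : List String) (h : ¬ l.length > 3) :
    PySem.List.slice l (some (-3)) none = l := by
  rw [PySem.List.slice_from_neg_ofNat l 3 (by omega)]
  have : l.length - 3 = 0 := by omega
  simp [this]

-- ===== VERDICT (by name: the statement is the Claim_ definition above) =====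
theorem cleanup_location_phrase_py_spec : Claim_equal_cleanup_location_phrase_py := by
  intro value _
  unfold Spec_cleanup_location_phrase_py cleanup_location_phrase_py cleanup_location_phrase_py_alt
  obtain ⟨h1, h2⟩ := pvStep_invariant (PySem.Str.split₀ value)
  simp only [pvALoop_nil, h2]
  split_ifs with hlen
  · rfl
  · rw [pvSliceNeg3_of_le _ hlen]
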